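-- pv_equiv track=rewrite | github.com/duartejr/revisao_agents | src/revisao_agents/utils/file_utils/helpers.py | fmt_snippets
-- ===== SOURCE A (Python) =====
-- from typing import List
--
-- def fmt_snippets(results: List[dict], max_chars: int = 1200) -> str:
--     """Formats search results with title, snippet, and URL into a single string.
--
--     Args:
--         results: List of search result dicts with 'title', 'snippet', and 'url' keys.
--         max_chars: Maximum total characters in the output string.
--
--     Returns:
--         A formatted string with numbered search results, truncated to max_chars.
--     """
--     block = ""
--     for i, r in enumerate(results, 1):
--         title = r.get("title", "")[:60]
--         snippet = r.get("snippet", "")[:250]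
--         url = r.get("url", "")[:120]
--         row = f"[{i}] {title}\n    {snippet}\n    {url}\n\n"
--         if len(block) + len(row) > max_chars:
--             break
--         block += row
--     return block.strip()
-- ===== SOURCE B (Python) =====
-- from typing import List
--
-- def fmt_snippets(results: List[dict], max_chars: int = 1200) -> str:
--     """Format first, then cut: build every row, scan cumulative lengths for
--     the budget cutoff, join the kept prefix."""
--     rows = [
--         f"[{i}] {r.get('title', '')[:60]}\n    {r.get('snippet', '')[:250]}\n    {r.get('url', '')[:120]}\n\n"
--         for i, r in enumerate(results, 1)
--     ]
--     keep = 0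
--     total = 0
--     for row in rows:
--         total += len(row)
--         if total > max_chars:
--             break
--         keep += 1
--     return "".join(rows[:keep]).strip()
-- ===== Notes on version B (the rewrite author's own statement) =====
-- stated objective: alternative
-- what changed: B separates formatting from the budget cutoff: it builds the list of all formatted rows first, then scans cumulative row lengths to find how many leading rows fit, and joins that prefix, instead of A's single loop interleaving string concatenation with the break test.
import Mathlib
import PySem

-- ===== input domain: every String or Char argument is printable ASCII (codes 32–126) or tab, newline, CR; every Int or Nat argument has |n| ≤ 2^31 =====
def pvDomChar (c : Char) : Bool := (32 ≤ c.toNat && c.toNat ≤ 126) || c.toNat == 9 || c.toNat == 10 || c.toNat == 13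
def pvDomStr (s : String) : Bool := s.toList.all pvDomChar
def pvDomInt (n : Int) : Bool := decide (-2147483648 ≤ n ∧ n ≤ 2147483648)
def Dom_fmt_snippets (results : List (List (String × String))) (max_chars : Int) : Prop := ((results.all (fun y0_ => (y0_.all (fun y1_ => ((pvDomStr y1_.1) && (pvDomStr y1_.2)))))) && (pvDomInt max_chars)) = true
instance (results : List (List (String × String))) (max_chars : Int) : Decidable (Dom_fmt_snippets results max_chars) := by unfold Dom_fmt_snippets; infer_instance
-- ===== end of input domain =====

-- B formats every row up front, finds the budget cutoff by scanning cumulative lengths, and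
-- joins the kept prefix, instead of A's interleaved concatenate-and-test loop (objective: alternative).

-- the row f-string, identical in both Pythons (r.get(k, '') is first-match assoc lookup)
def pvRow (i : Int) (r : List (String × String)) : String :=
  let title := PySem.Str.slice ((PySem.Dict.mk r).getD "title" "") none (some 60)
  let snippet := PySem.Str.slice ((PySem.Dict.mk r).getD "snippet" "") none (some 250)
  let url := PySem.Str.slice ((PySem.Dict.mk r).getD "url" "") none (some 120)
  "[" ++ PySem.Int.toStr i ++ "] " ++ title ++ "\n    " ++ snippet ++ "\n    " ++ url ++ "\n\n"

-- ===== PORT A =====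
-- A's for-loop with break: recursion over results carrying the 1-based index and the block built so far
def fmtLoopA (max_chars : Int) : List (List (String × String)) → Int → String → String
  | [], _, block => block
  | r :: rest, i, block =>
    let row := pvRow i r
    if PySem.Str.len block + PySem.Str.len row > max_chars then block
    else fmtLoopA max_chars rest (i + 1) (block ++ row)

def fmt_snippets (results : List (List (String × String))) (max_chars : Int) : String :=
  PySem.Str.strip (fmtLoopA max_chars results 1 "")

-- ===== PORT B =====
-- Source B's counting loop: how many leading rows keep the running total within max_chars
def fmtKeepB (max_chars : Int) : List String → Int → Nat
  | [], _ => 0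
  | row :: rest, total =>
    let t := total + PySem.Str.len row
    if t > max_chars then 0 else fmtKeepB max_chars rest t + 1

def fmt_snippets_alt (results : List (List (String × String))) (max_chars : Int) : String :=
  let rows := (PySem.List.enumerate results 1).map (fun p => pvRow p.1 p.2)
  let keep := fmtKeepB max_chars rows 0
  PySem.Str.strip (PySem.Str.join "" (rows.take keep))

-- ===== PRECONDITION & SPEC =====
def Spec_fmt_snippets (results : List (List (String × String))) (max_chars : Int) (out : String) : Prop := out = fmt_snippets_alt results max_chars
instance (results : List (List (String × String))) (max_chars : Int) (out : String) : Decidable (Spec_fmt_snippets results max_chars out) := by unfold Spec_fmt_snippets; infer_instance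

-- ===== CLAIM (what is proved, stated in full; the proofs are below) =====
def Claim_equal_fmt_snippets : Prop := ∀ (results : List (List (String × String))) (max_chars : Int), Dom_fmt_snippets results max_chars → Spec_fmt_snippets results max_chars (fmt_snippets results max_chars)

-- ===== LEMMAS AND PROOFS =====

lemma join_empty_cons (a : String) (l : List String) :
    PySem.Str.join "" (a :: l) = a ++ PySem.Str.join "" l := by
  cases l with
  | nil => simp [PySem.Str.join, PySem.Chars.join_singleton, PySem.Chars.join_nil]
  | cons b bs =>
    simp only [PySem.Str.join, List.map_cons]
    rw [show ("" : String).toList = [] from rfl, PySem.Chars.join_cons_cons]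
    simp [String.ofList_append]

lemma fmtLoopA_eq (max_chars : Int) (rs : List (List (String × String))) :
    ∀ (i : Int) (block : String),
      fmtLoopA max_chars rs i block =
        block ++ PySem.Str.join ""
          (((PySem.List.enumerate rs i).map (fun p => pvRow p.1 p.2)).take
            (fmtKeepB max_chars ((PySem.List.enumerate rs i).map (fun p => pvRow p.1 p.2))
              (PySem.Str.len block))) := by
  induction rs with
  | nil => intro i block; simp [fmtLoopA, PySem.List.enumerate, PySem.Str.join, PySem.Chars.join_nil]
  | cons r rest ih =>
    intro i block
    rw [PySem.List.enumerate_cons]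
    simp only [List.map_cons]
    rw [show fmtLoopA max_chars (r :: rest) i block =
         (if PySem.Str.len block + PySem.Str.len (pvRow i r) > max_chars then block
          else fmtLoopA max_chars rest (i + 1) (block ++ pvRow i r)) from rfl]
    rw [show fmtKeepB max_chars (pvRow i r :: (PySem.List.enumerate rest (i+1)).map (fun p => pvRow p.1 p.2)) (PySem.Str.len block) =
         (if PySem.Str.len block + PySem.Str.len (pvRow i r) > max_chars then 0
          else fmtKeepB max_chars ((PySem.List.enumerate rest (i+1)).map (fun p => pvRow p.1 p.2)) (PySem.Str.len block + PySem.Str.len (pvRow i r)) + 1) from rfl]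
    split_ifs with h
    · simp [PySem.Str.join, PySem.Chars.join_nil]
    · rw [List.take_succ_cons, join_empty_cons, ih (i + 1) (block ++ pvRow i r),
        PySem.Str.len_append, String.append_assoc]

-- ===== VERDICT (by name: the statement is the Claim_ definition above) =====
theorem fmt_snippets_spec : Claim_equal_fmt_snippets := by
  intro results max_chars _
  unfold Spec_fmt_snippets fmt_snippets fmt_snippets_alt
  rw [fmtLoopA_eq]
  simp [PySem.Str.len]
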